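-- pv_equiv track=rewrite | github.com/imoldovea/AIGames | rnn_maze_solver.py | coordinates_to_actions
-- ===== SOURCE A (Python) =====
-- def coordinates_to_actions(coordinate_path):
--     """
--     Convert a list of coordinates to a list of actions.
--
--     Parameters:
--         coordinate_path (list of tuple): List of (row, col) tuples representing the path.
--
--     Returns:
--         list of str: List of actions ('up', 'down', 'left', 'right').
--     """
--     actions = []
--     for i in range(1, len(coordinate_path)):
--         prev_row, prev_col = coordinate_path[i - 1]
--         current_row, current_col = coordinate_path[i]
--
--         if current_row == prev_row - 1 and current_col == prev_col:
--             actions.append('up')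
--         elif current_row == prev_row + 1 and current_col == prev_col:
--             actions.append('down')
--         elif current_row == prev_row and current_col == prev_col - 1:
--             actions.append('left')
--         elif current_row == prev_row and current_col == prev_col + 1:
--             actions.append('right')
--         else:
--             raise ValueError(f"Invalid movement from {coordinate_path[i - 1]} to {coordinate_path[i]}")
--
--     return actions
-- ===== SOURCE B (Python) =====
-- def coordinates_to_actions(coordinate_path):
--     """Recursive: emit the first step's action, recurse on the rest of the path.
--
--     Each unit step (dr, dc) is classified arithmetically: k = 3*dr + dc takes the
--     values -3, -1, 1, 3 for up, left, right, down, so (k + 3) // 2 indexes a table.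
--     """
--     if len(coordinate_path) < 2:
--         return []
--     prev, cur = coordinate_path[0], coordinate_path[1]
--     dr, dc = cur[0] - prev[0], cur[1] - prev[1]
--     if abs(dr) + abs(dc) != 1:
--         raise ValueError(f"Invalid movement from {prev} to {cur}")
--     action = ['up', 'left', 'right', 'down'][(3 * dr + dc + 3) // 2]
--     return [action] + coordinates_to_actions(coordinate_path[1:])
-- ===== Notes on version B (the rewrite author's own statement) =====
-- stated objective: alternative
-- what changed: Replaces the index loop with structural recursion on the path and the four-way if/elif branch chain with an arithmetic encoding (k = 3*dr+dc, index (k+3)//2 into a table) after a single unit-step validity check.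
import Mathlib
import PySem

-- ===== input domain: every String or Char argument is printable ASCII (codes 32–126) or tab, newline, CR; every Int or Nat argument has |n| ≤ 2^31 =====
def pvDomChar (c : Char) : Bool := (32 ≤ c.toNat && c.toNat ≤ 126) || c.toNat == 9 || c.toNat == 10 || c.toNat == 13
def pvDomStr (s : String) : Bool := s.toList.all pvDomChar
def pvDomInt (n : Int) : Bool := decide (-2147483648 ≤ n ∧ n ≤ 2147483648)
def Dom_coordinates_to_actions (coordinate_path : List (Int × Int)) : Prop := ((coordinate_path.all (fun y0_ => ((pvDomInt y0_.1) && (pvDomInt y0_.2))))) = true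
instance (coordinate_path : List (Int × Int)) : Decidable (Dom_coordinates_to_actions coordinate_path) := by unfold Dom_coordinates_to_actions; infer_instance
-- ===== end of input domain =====

-- B replaces A's index loop + four-way if/elif chain by structural recursion on the path
-- with an arithmetic classification of each unit step (index (3*dr+dc+3)//2 into a table);
-- same result under Pre_ (paths of unit steps, on which both Pythons return).

-- ===== PORT A =====
def pvStepA (cp : List (Int × Int)) (acc : List String) (i : Int) : List String :=
  match PySem.List.pyGet? cp (i - 1), PySem.List.pyGet? cp i with
  | some (prev_row, prev_col), some (current_row, current_col) =>
    if current_row = prev_row - 1 ∧ current_col = prev_col then acc ++ ["up"]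
    else if current_row = prev_row + 1 ∧ current_col = prev_col then acc ++ ["down"]
    else if current_row = prev_row ∧ current_col = prev_col - 1 then acc ++ ["left"]
    else if current_row = prev_row ∧ current_col = prev_col + 1 then acc ++ ["right"]
    else acc  -- Python raises ValueError here; excluded by Pre_
  | _, _ => acc  -- unreachable for in-range i

def coordinates_to_actions (coordinate_path : List (Int × Int)) : List String :=
  (PySem.List.pyRange 1 coordinate_path.length 1).foldl (pvStepA coordinate_path) []

-- ===== PORT B =====
-- action of the unit step p → q, via k = 3*dr + dc ∈ {-3,-1,1,3} and index (k+3)//2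
def pvStepB (p q : Int × Int) : String :=
  (PySem.List.pyGet? ["up", "left", "right", "down"]
    (PySem.Int.floordiv (3 * (q.1 - p.1) + (q.2 - p.2) + 3) 2)).getD ""

def coordinates_to_actions_alt : List (Int × Int) → List String
  | p :: q :: rest =>
    if (q.1 - p.1).natAbs + (q.2 - p.2).natAbs ≠ 1 then []  -- Python raises ValueError; excluded by Pre_
    else pvStepB p q :: coordinates_to_actions_alt (q :: rest)
  | _ => []

-- ===== PRECONDITION & SPEC =====
-- Pre_ excludes paths containing a consecutive step that is not one of the four unit moves:
-- on those both Pythons raise ValueError (no value is returned).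
def Pre_coordinates_to_actions (coordinate_path : List (Int × Int)) : Prop :=
  ∀ pq ∈ coordinate_path.zip coordinate_path.tail,
    (pq.2.1 - pq.1.1, pq.2.2 - pq.1.2) ∈ [((-1 : Int), (0 : Int)), (1, 0), (0, -1), (0, 1)]
instance (coordinate_path : List (Int × Int)) : Decidable (Pre_coordinates_to_actions coordinate_path) := by unfold Pre_coordinates_to_actions; infer_instance

def pvWitness_coordinates_to_actions : (List (Int × Int)) := [(0, 0), (1, 0), (1, 1), (0, 1)]

def Spec_coordinates_to_actions (coordinate_path : List (Int × Int)) (out : List String) : Prop := out = coordinates_to_actions_alt coordinate_path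
instance (coordinate_path : List (Int × Int)) (out : List String) : Decidable (Spec_coordinates_to_actions coordinate_path out) := by unfold Spec_coordinates_to_actions; infer_instance

-- ===== CLAIM (what is proved, stated in full; the proofs are below) =====
def Claim_equal_coordinates_to_actions : Prop := ∀ (coordinate_path : List (Int × Int)), Dom_coordinates_to_actions coordinate_path → Pre_coordinates_to_actions coordinate_path → Spec_coordinates_to_actions coordinate_path (coordinates_to_actions coordinate_path)

-- ===== LEMMAS AND PROOFS =====

lemma pvStep_pair (acc : List String) (p q : Int × Int)
    (h : (q.1 - p.1, q.2 - p.2) ∈ [((-1 : Int), (0 : Int)), (1, 0), (0, -1), (0, 1)]) :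
    (if q.1 = p.1 - 1 ∧ q.2 = p.2 then acc ++ ["up"]
     else if q.1 = p.1 + 1 ∧ q.2 = p.2 then acc ++ ["down"]
     else if q.1 = p.1 ∧ q.2 = p.2 - 1 then acc ++ ["left"]
     else if q.1 = p.1 ∧ q.2 = p.2 + 1 then acc ++ ["right"]
     else acc)
    = acc ++ [pvStepB p q] := by
  simp only [List.mem_cons, Prod.mk.injEq, List.not_mem_nil, or_false] at h
  unfold pvStepB
  rcases h with ⟨h1, h2⟩ | ⟨h1, h2⟩ | ⟨h1, h2⟩ | ⟨h1, h2⟩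
  · rw [if_pos ⟨by omega, by omega⟩,
      show 3 * (q.1 - p.1) + (q.2 - p.2) + 3 = 0 from by omega]; rfl
  · rw [if_neg (by omega), if_pos ⟨by omega, by omega⟩,
      show 3 * (q.1 - p.1) + (q.2 - p.2) + 3 = 6 from by omega]; rfl
  · rw [if_neg (by omega), if_neg (by omega), if_pos ⟨by omega, by omega⟩,
      show 3 * (q.1 - p.1) + (q.2 - p.2) + 3 = 2 from by omega]; rfl
  · rw [if_neg (by omega), if_neg (by omega), if_neg (by omega), if_pos ⟨by omega, by omega⟩,
      show 3 * (q.1 - p.1) + (q.2 - p.2) + 3 = 4 from by omega]; rfl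

lemma pvAlt_eq_map (cp : List (Int × Int)) (hpre : Pre_coordinates_to_actions cp) :
    coordinates_to_actions_alt cp
      = (cp.zip cp.tail).map (fun pq => pvStepB pq.1 pq.2) := by
  induction cp with
  | nil => rfl
  | cons p rest ih =>
    cases rest with
    | nil => rfl
    | cons q rest' =>
      have hmem : ((p, q) : (Int × Int) × (Int × Int)) ∈ (p :: q :: rest').zip (p :: q :: rest').tail := by
        simp
      have habs : (q.1 - p.1).natAbs + (q.2 - p.2).natAbs = 1 := by
        have := hpre _ hmem
        simp only [List.mem_cons, Prod.mk.injEq, List.not_mem_nil, or_false] at this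
        rcases this with ⟨h1, h2⟩ | ⟨h1, h2⟩ | ⟨h1, h2⟩ | ⟨h1, h2⟩ <;> omega
      have hpre' : Pre_coordinates_to_actions (q :: rest') := by
        intro pq hpq
        exact hpre pq (by simp [List.zip] at hpq ⊢; tauto)
      have ih' := ih hpre'
      show (if (q.1 - p.1).natAbs + (q.2 - p.2).natAbs ≠ 1 then []
            else pvStepB p q :: coordinates_to_actions_alt (q :: rest'))
          = _
      rw [if_neg (by omega)]
      simp only [List.tail_cons, List.zip_cons_cons, List.map_cons]
      exact congrArg _ ih'

lemma pvMain (cp : List (Int × Int)) (hpre : Pre_coordinates_to_actions cp) :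
    ∀ (k : Nat) (acc : List String),
      (PySem.List.pyRange ((k : Int) + 1) cp.length 1).foldl (pvStepA cp) acc
        = acc ++ (((cp.drop k).zip (cp.drop k).tail).map (fun pq => pvStepB pq.1 pq.2)) := by
  intro k
  induction hn : cp.length - k generalizing k with
  | zero =>
    intro acc
    rw [PySem.List.pyRange_one_eq_nil (by omega)]
    have hd : (cp.drop k).tail = [] := by
      have h1 : (cp.drop k).length ≤ 1 := by simp; omega
      cases hdk : cp.drop k with
      | nil => rfl
      | cons a l => rw [hdk] at h1; simp at h1; simp [h1]
    simp [hd]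
  | succ n ih =>
    intro acc
    by_cases hk : k + 1 < cp.length
    · rw [PySem.List.pyRange_one_cons (by omega)]
      simp only [List.foldl_cons]
      have hget1 : PySem.List.pyGet? cp ((k : Int) + 1 - 1) = some cp[k] := by
        rw [show (k : Int) + 1 - 1 = (k : Int) from by ring, PySem.List.pyGet?_natCast]
        simp [List.getElem?_eq_getElem (by omega : k < cp.length)]
      have hget2 : PySem.List.pyGet? cp ((k : Int) + 1) = some cp[k + 1] := by
        rw [show (k : Int) + 1 = ((k + 1 : Nat) : Int) from by push_cast; ring,
          PySem.List.pyGet?_natCast]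
        simp [List.getElem?_eq_getElem hk]
      have hmem : (cp[k], cp[k + 1]) ∈ cp.zip cp.tail := by
        have hlen : k < (cp.zip cp.tail).length := by
          simp [List.length_zip, List.length_tail]; omega
        have : (cp.zip cp.tail)[k]'hlen = (cp[k], cp[k + 1]) := by
          simp [List.getElem_zip, List.getElem_tail]
        exact this ▸ List.getElem_mem hlen
      have hstep : pvStepA cp acc ((k : Int) + 1) = acc ++ [pvStepB cp[k] cp[k + 1]] := by
        unfold pvStepA
        rw [hget1, hget2]
        exact pvStep_pair acc cp[k] cp[k + 1] (hpre _ hmem)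
      rw [hstep, show (k : Int) + 1 + 1 = ((k + 1 : Nat) : Int) + 1 from by push_cast; ring,
        ih (k + 1) (by omega)]
      have e1 : List.drop k cp = cp[k] :: List.drop (k + 1) cp :=
        List.drop_eq_getElem_cons (by omega)
      have e2 : List.drop (k + 1) cp = cp[k + 1] :: List.drop (k + 2) cp :=
        List.drop_eq_getElem_cons hk
      simp only [e1, e2, List.tail_cons, List.zip_cons_cons, List.map_cons]
      simp
    · rw [PySem.List.pyRange_one_eq_nil (by omega)]
      have hd : (cp.drop k).tail = [] := by
        have h1 : (cp.drop k).length ≤ 1 := by simp; omega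
        cases hdk : cp.drop k with
        | nil => rfl
        | cons a l => rw [hdk] at h1; simp at h1; simp [h1]
      simp [hd]

-- ===== VERDICT (by name: the statement is the Claim_ definition above) =====
theorem coordinates_to_actions_spec : Claim_equal_coordinates_to_actions := by
  intro cp _ hpre
  unfold Spec_coordinates_to_actions coordinates_to_actions
  rw [pvAlt_eq_map cp hpre]
  have h := pvMain cp hpre 0 []
  norm_num at h
  simpa using h
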